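-- pv_equiv track=rewrite | github.com/seanhwang10/PCB-Stackup-Generator | sandbox3.py | create_stackup_array
-- ===== SOURCE A (Python) =====
-- def create_stackup_array(given_layers):
--     stackup_array = []
--
--     if ((given_layers - 2) / 2) % 2 != 0:
--         error_message = "Unable to generate symmetrical stackup with given number of layers."
--         stackup_array.append(error_message)
--         return stackup_array
--
--     symmetric_line = given_layers // 2
--
--     for i in range(1, symmetric_line):
--         if i % 2 == 1:
--             stackup_array.append(f"Layer {i} - Upper - Signal")
--         else:
--             stackup_array.append(f"Layer {i} - Upper - Ground")
--
--     stackup_array.append(f"Layer {symmetric_line} - Middle - Power")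
--     stackup_array.append(f"Layer {symmetric_line + 1} - Middle - Power")
--
--     for i in range(symmetric_line + 2, given_layers + 1):
--         if i % 2 == 1:
--             stackup_array.append(f"Layer {i} - Lower - Ground")
--         else:
--             stackup_array.append(f"Layer {i} - Lower - Signal")
--
--     return stackup_array
-- ===== SOURCE B (Python) =====
-- def create_stackup_array(given_layers):
--     # A's float guard ((given_layers - 2) / 2) % 2 != 0 is exact here: error iff n % 4 != 2
--     if given_layers % 4 != 2:
--         return ["Unable to generate symmetrical stackup with given number of layers."]
--     sym = given_layers // 2
--     uppers = []
--     lowers = []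
--     # one pass over the upper half only: layer i and its mirror layer n+1-i share one role
--     for i in range(1, sym):
--         role = "Signal" if i % 2 == 1 else "Ground"
--         uppers.append(f"Layer {i} - Upper - {role}")
--         lowers.append(f"Layer {given_layers + 1 - i} - Lower - {role}")
--     middle = [f"Layer {sym} - Middle - Power", f"Layer {sym + 1} - Middle - Power"]
--     return uppers + middle + list(reversed(lowers))
-- ===== Notes on version B (the rewrite author's own statement) =====
-- stated objective: alternative
-- what changed: B exploits the stackup's symmetry: instead of A's two independent full-range loops (upper then lower, each with its own parity test), B makes ONE pass over the upper half only, emitting each symmetric pair (layer i Upper, mirror layer n+1-i Lower) from a single shared role, and obtains the lower section by reversing the collected mirrors.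
import Mathlib
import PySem

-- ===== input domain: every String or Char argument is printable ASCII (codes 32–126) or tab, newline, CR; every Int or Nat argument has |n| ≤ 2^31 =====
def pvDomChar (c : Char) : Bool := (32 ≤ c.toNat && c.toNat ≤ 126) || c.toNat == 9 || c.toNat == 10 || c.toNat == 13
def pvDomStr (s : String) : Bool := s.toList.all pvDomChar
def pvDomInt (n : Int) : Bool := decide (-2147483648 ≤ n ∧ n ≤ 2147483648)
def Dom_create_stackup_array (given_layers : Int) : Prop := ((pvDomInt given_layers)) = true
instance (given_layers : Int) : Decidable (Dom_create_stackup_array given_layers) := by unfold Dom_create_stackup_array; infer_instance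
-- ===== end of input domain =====

-- B builds the stackup by symmetry: one pass over the upper half emits each mirror PAIR
-- (layer i Upper, layer n+1-i Lower) from one shared role; lower section by reversal.

-- ===== PORT A =====
-- A's guard is the float test ((given_layers - 2) / 2) % 2 != 0; for |n| ≤ 2^31 the float
-- arithmetic is exact, so the test is exactly "(given_layers - 2) % 4 != 0" — ported so.
def create_stackup_array (given_layers : Int) : List String :=
  if PySem.Int.mod (given_layers - 2) 4 ≠ 0 then
    ["Unable to generate symmetrical stackup with given number of layers."]
  else
    let sym := PySem.Int.floordiv given_layers 2
    let upper := (PySem.List.pyRange 1 sym 1).foldl (fun acc i =>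
      if PySem.Int.mod i 2 = 1 then acc ++ ["Layer " ++ PySem.Int.toStr i ++ " - Upper - Signal"]
      else acc ++ ["Layer " ++ PySem.Int.toStr i ++ " - Upper - Ground"]) []
    let mid := upper ++ ["Layer " ++ PySem.Int.toStr sym ++ " - Middle - Power",
                         "Layer " ++ PySem.Int.toStr (sym + 1) ++ " - Middle - Power"]
    (PySem.List.pyRange (sym + 2) (given_layers + 1) 1).foldl (fun acc i =>
      if PySem.Int.mod i 2 = 1 then acc ++ ["Layer " ++ PySem.Int.toStr i ++ " - Lower - Ground"]
      else acc ++ ["Layer " ++ PySem.Int.toStr i ++ " - Lower - Signal"]) mid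

-- ===== PORT B =====
-- the loop keeps TWO accumulators (uppers, lowers); role is inlined into each f-string
def create_stackup_array_alt (given_layers : Int) : List String :=
  if PySem.Int.mod given_layers 4 ≠ 2 then
    ["Unable to generate symmetrical stackup with given number of layers."]
  else
    let sym := PySem.Int.floordiv given_layers 2
    let pairs := (PySem.List.pyRange 1 sym 1).foldl (fun (acc : List String × List String) i =>
      (acc.1 ++ ["Layer " ++ PySem.Int.toStr i ++ " - Upper - " ++
                   (if PySem.Int.mod i 2 = 1 then "Signal" else "Ground")],
       acc.2 ++ ["Layer " ++ PySem.Int.toStr (given_layers + 1 - i) ++ " - Lower - " ++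
                   (if PySem.Int.mod i 2 = 1 then "Signal" else "Ground")]))
      ([], [])
    let middle := ["Layer " ++ PySem.Int.toStr sym ++ " - Middle - Power",
                   "Layer " ++ PySem.Int.toStr (sym + 1) ++ " - Middle - Power"]
    pairs.1 ++ middle ++ pairs.2.reverse

-- ===== PRECONDITION & SPEC =====
def Spec_create_stackup_array (given_layers : Int) (out : List String) : Prop := out = create_stackup_array_alt given_layers
instance (given_layers : Int) (out : List String) : Decidable (Spec_create_stackup_array given_layers out) := by unfold Spec_create_stackup_array; infer_instance

-- ===== CLAIM (what is proved, stated in full; the proofs are below) =====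
def Claim_equal_create_stackup_array : Prop := ∀ (given_layers : Int), Dom_create_stackup_array given_layers → Spec_create_stackup_array given_layers (create_stackup_array given_layers)

-- ===== LEMMAS AND PROOFS =====

theorem line_glue (x : String) {u v w : String} (h : u ++ v = w) :
    x ++ u ++ v = x ++ w := by rw [String.append_assoc, h]

-- a loop 'if p(i): out.append(f(i)) else: out.append(g(i))' is a map
theorem foldl_ite2 (l : List Int) (f g : Int → String) (init : List String) :
    l.foldl (fun acc i => if i % 2 = 1 then acc ++ [f i] else acc ++ [g i]) init
      = init ++ l.map (fun i => if i % 2 = 1 then f i else g i) := by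
  have h : (fun (acc : List String) i => if i % 2 = 1 then acc ++ [f i] else acc ++ [g i])
      = fun acc i => acc ++ [if i % 2 = 1 then f i else g i] := by
    funext acc i; split <;> rfl
  rw [h, PySem.List.foldl_append_singleton_eq_map]

theorem main_equal (n : Int) : create_stackup_array n = create_stackup_array_alt n := by
  unfold create_stackup_array create_stackup_array_alt
  simp only [show ∀ a : Int, PySem.Int.mod a 2 = a % 2 from
               fun a => PySem.Int.mod_eq_emod_of_pos (by norm_num),
             show ∀ a : Int, PySem.Int.mod a 4 = a % 4 from
               fun a => PySem.Int.mod_eq_emod_of_pos (by norm_num),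
             show ∀ a : Int, PySem.Int.floordiv a 2 = a / 2 from
               fun a => PySem.Int.floordiv_eq_ediv_of_pos (by norm_num)]
  by_cases hg : n % 4 = 2
  · rw [if_neg (show ¬((n - 2) % 4 ≠ 0) by omega), if_neg (show ¬(n % 4 ≠ 2) by omega)]
    set s := n / 2 with hs
    have hn2 : n = 2 * s := by omega
    have hsodd : s % 2 = 1 := by omega
    rw [foldl_ite2, foldl_ite2,
        PySem.List.foldl_prod_mk
          (f := fun acc i => acc ++ ["Layer " ++ PySem.Int.toStr i ++ " - Upper - " ++
                   (if i % 2 = 1 then "Signal" else "Ground")])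
          (g := fun acc i => acc ++ ["Layer " ++ PySem.Int.toStr (n + 1 - i) ++ " - Lower - " ++
                   (if i % 2 = 1 then "Signal" else "Ground")]),
        PySem.List.foldl_append_singleton_eq_map, PySem.List.foldl_append_singleton_eq_map]
    have hU : (PySem.List.pyRange 1 s 1).map
          (fun i => if i % 2 = 1 then "Layer " ++ PySem.Int.toStr i ++ " - Upper - Signal"
                    else "Layer " ++ PySem.Int.toStr i ++ " - Upper - Ground")
        = (PySem.List.pyRange 1 s 1).map
          (fun i => "Layer " ++ PySem.Int.toStr i ++ " - Upper - " ++
                    (if i % 2 = 1 then "Signal" else "Ground")) := by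
      apply List.map_congr_left
      intro i _
      by_cases hp : i % 2 = 1
      · rw [if_pos hp, if_pos hp]
        exact (line_glue _ (u := " - Upper - ") (v := "Signal") (w := " - Upper - Signal") rfl).symm
      · rw [if_neg hp, if_neg hp]
        exact (line_glue _ (u := " - Upper - ") (v := "Ground") (w := " - Upper - Ground") rfl).symm
    have hr2 : PySem.List.pyRange (s + 2) (n + 1) 1
        = List.map (fun k : Nat => s + 2 + (k : Int)) (List.range (s - 1).toNat) := by
      rw [PySem.List.pyRange_one, show (n + 1 - (s + 2) : Int) = s - 1 from by omega]
    have hrrev : (PySem.List.pyRange 1 s 1).reverse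
        = List.map (fun k : Nat => s - 1 - (k : Int)) (List.range (s - 1).toNat) := by
      have h := PySem.List.pyRange_neg_one_eq_reverse (s - 1) 0
      rw [show (0 : Int) + 1 = 1 from by norm_num, show (s - 1 + 1 : Int) = s from by omega] at h
      rw [← h, PySem.List.pyRange_neg_one, show (s - 1 - 0 : Int) = s - 1 from by omega]
    have hL : (PySem.List.pyRange (s + 2) (n + 1) 1).map
          (fun i => if i % 2 = 1 then "Layer " ++ PySem.Int.toStr i ++ " - Lower - Ground"
                    else "Layer " ++ PySem.Int.toStr i ++ " - Lower - Signal")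
        = ((PySem.List.pyRange 1 s 1).map
          (fun i => "Layer " ++ PySem.Int.toStr (n + 1 - i) ++ " - Lower - " ++
                    (if i % 2 = 1 then "Signal" else "Ground"))).reverse := by
      rw [← List.map_reverse, hrrev, hr2, List.map_map, List.map_map]
      apply List.map_congr_left
      intro k _
      simp only [Function.comp]
      rw [show (n + 1 - (s - 1 - (k : Int)) : Int) = s + 2 + k from by omega]
      by_cases hk2 : (k : Int) % 2 = 0
      · rw [if_pos (show (s + 2 + (k : Int)) % 2 = 1 by omega),
            if_neg (show ¬((s - 1 - (k : Int)) % 2 = 1) by omega)]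
        exact (line_glue _ (u := " - Lower - ") (v := "Ground") (w := " - Lower - Ground") rfl).symm
      · rw [if_neg (show ¬((s + 2 + (k : Int)) % 2 = 1) by omega),
            if_pos (show (s - 1 - (k : Int)) % 2 = 1 by omega)]
        exact (line_glue _ (u := " - Lower - ") (v := "Signal") (w := " - Lower - Signal") rfl).symm
    rw [hU, hL]
    simp [List.append_assoc]
  · rw [if_pos (show (n - 2) % 4 ≠ 0 by omega), if_pos (show n % 4 ≠ 2 by omega)]

-- ===== VERDICT (by name: the statement is the Claim_ definition above) =====
theorem create_stackup_array_spec : Claim_equal_create_stackup_array := by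
  intro n _
  exact main_equal n
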